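-- pv_equiv track=rewrite | github.com/duriantaco/jonq | jonq/parser.py | _strip_outer_expr_parens
-- ===== SOURCE A (Python) =====
-- def _strip_outer_expr_parens(expr_str: str) -> str:
--     expr_str = expr_str.strip()
--     while expr_str.startswith("(") and expr_str.endswith(")"):
--         depth = 0
--         in_sq = in_dq = False
--         wraps = True
--         for i, ch in enumerate(expr_str):
--             if ch == "'" and not in_dq:
--                 in_sq = not in_sq
--             elif ch == '"' and not in_sq:
--                 in_dq = not in_dq
--             elif ch == "(" and not in_sq and not in_dq:
--                 depth += 1
--             elif ch == ")" and not in_sq and not in_dq: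
--                 depth -= 1
--                 if depth == 0 and i != len(expr_str) - 1:
--                     wraps = False
--                     break
--         if not wraps:
--             break
--         expr_str = expr_str[1:-1].strip()
--     return expr_str
-- ===== SOURCE B (Python) =====
-- def _strip_outer_expr_parens(expr_str: str) -> str:
--     s = expr_str.strip()
--     # One quote-aware pass: match[i] = index of the ')' closing the effective '(' at i.
--     match = {}
--     stack = []
--     in_sq = in_dq = False
--     for i, ch in enumerate(s):
--         if ch == "'" and not in_dq:
--             in_sq = not in_sq
--         elif ch == '"' and not in_sq:
--             in_dq = not in_dq
--         elif ch == "(" and not in_sq and not in_dq: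
--             stack.append(i)
--         elif ch == ")" and not in_sq and not in_dq:
--             if stack:
--                 match[stack.pop()] = i
--     # Peel wrapping layers with two whitespace-skipping pointers.
--     l, r = 0, len(s) - 1
--     while l < r and s[l] == "(" and s[r] == ")" and match.get(l, r) >= r:
--         l += 1
--         r -= 1
--         while l <= r and s[l].isspace():
--             l += 1
--         while l <= r and s[r].isspace():
--             r -= 1
--     return s[l : r + 1]
-- ===== Notes on version B (the rewrite author's own statement) =====
-- stated objective: faster
-- what changed: A rescans the whole string (quote-aware depth scan) for every peeled paren layer; B does one quote-aware paren-matching pass building an open-index -> close-index dict, then peels all layers with two whitespace-skipping pointers and takes a single final slice.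
import Mathlib
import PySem

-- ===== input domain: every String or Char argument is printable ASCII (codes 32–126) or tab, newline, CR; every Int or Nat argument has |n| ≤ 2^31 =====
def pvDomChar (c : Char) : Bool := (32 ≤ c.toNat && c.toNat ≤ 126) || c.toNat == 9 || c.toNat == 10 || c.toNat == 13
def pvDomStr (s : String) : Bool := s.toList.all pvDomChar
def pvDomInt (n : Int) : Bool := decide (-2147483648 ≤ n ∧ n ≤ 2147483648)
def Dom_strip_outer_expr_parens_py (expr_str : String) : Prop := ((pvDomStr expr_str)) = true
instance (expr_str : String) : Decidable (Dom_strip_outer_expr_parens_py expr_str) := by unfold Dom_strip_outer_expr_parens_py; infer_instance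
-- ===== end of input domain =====

-- B replaces A's re-scan-per-layer peeling (quadratic in the nesting depth) by one quote-aware
-- paren-matching pass plus two whitespace-skipping pointers: a linear-time alternative.

-- ===== PORT A =====

-- A's inner `for` loop: one quote-aware scan returning the `wraps` flag
-- (`i != len-1` becomes `rest ≠ []`).
def aWraps : List Char → Int → Bool → Bool → Bool
  | [], _, _, _ => true
  | c :: rest, depth, sq, dq =>
    if c = '\'' ∧ dq = false then aWraps rest depth (!sq) dq
    else if c = '"' ∧ sq = false then aWraps rest depth sq (!dq)
    else if c = '(' ∧ sq = false ∧ dq = false then aWraps rest (depth + 1) sq dq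
    else if c = ')' ∧ sq = false ∧ dq = false then
      (if depth - 1 = 0 ∧ rest ≠ [] then false else aWraps rest (depth - 1) sq dq)
    else aWraps rest depth sq dq

-- termination helper for aLoop (strip never lengthens a string)
theorem pvStripLenLe (s : List Char) : (PySem.Chars.strip s).length ≤ s.length := by
  simp only [PySem.Chars.strip, PySem.Chars.rstrip, PySem.Chars.lstrip]
  have h1 := List.length_dropWhile_le PySem.Chars.isspace s
  have h2 := List.length_dropWhile_le PySem.Chars.isspace
    (List.dropWhile PySem.Chars.isspace s).reverse
  simp only [List.length_reverse] at *
  omega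

-- A's `while` loop
def aLoop (t : List Char) : List Char :=
  if PySem.Chars.startswith t ['('] = true ∧ PySem.Chars.endswith t [')'] = true then
    if aWraps t 0 false false = true then
      aLoop (PySem.Chars.strip (PySem.Chars.slice t (some 1) (some (-1))))
    else t
  else t
termination_by t.length
decreasing_by
  rename_i h _
  have ht : t ≠ [] := by
    rcases h with ⟨h1, -⟩
    intro he; subst he; simp [PySem.Chars.startswith, List.isPrefixOf] at h1
  have h0 : 0 < t.length := List.length_pos_iff.mpr ht
  have hs := pvStripLenLe (PySem.Chars.slice t (some 1) (some (-1)))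
  have hl : (PySem.Chars.slice t (some 1) (some (-1))).length < t.length := by
    simp only [PySem.Chars.slice_eq_listSlice, PySem.List.length_slice]
    simp [PySem.List.clampIdx, ht]
    omega
  omega

def strip_outer_expr_parens_py (expr_str : String) : String :=
  String.ofList (aLoop (PySem.Chars.strip expr_str.toList))

-- ===== PORT B =====

-- B's single quote-aware pass building the paren-match dict (stack of open positions).
def bBuild : List Char → Nat → List Nat → PySem.Dict Nat Nat → Bool → Bool → PySem.Dict Nat Nat
  | [], _, _, m, _, _ => m
  | c :: rest, i, st, m, sq, dq =>
    if c = '\'' ∧ dq = false then bBuild rest (i + 1) st m (!sq) dq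
    else if c = '"' ∧ sq = false then bBuild rest (i + 1) st m sq (!dq)
    else if c = '(' ∧ sq = false ∧ dq = false then bBuild rest (i + 1) (i :: st) m sq dq
    else if c = ')' ∧ sq = false ∧ dq = false then
      (match st with
       | [] => bBuild rest (i + 1) [] m sq dq
       | l :: st' => bBuild rest (i + 1) st' (m.insert l i) sq dq)
    else bBuild rest (i + 1) st m sq dq

-- B's left whitespace-skip `while`
def bSkipL (s : List Char) (l r : Nat) : Nat :=
  if l ≤ r ∧ PySem.Chars.isspace (s.getD l ' ') = true then bSkipL s (l + 1) r else l
termination_by r + 1 - l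
decreasing_by rename_i h; omega

-- B's right whitespace-skip `while`.  (Python's r is an int and could in principle step to -1;
-- that state is unreachable from bLoop — the left skip has already passed any all-space region —
-- so the r = 0 case simply returns 0.)
def bSkipR (s : List Char) (l : Nat) : Nat → Nat
  | 0 => 0
  | r + 1 =>
    if l ≤ r + 1 ∧ PySem.Chars.isspace (s.getD (r + 1) ' ') = true then bSkipR s l r else r + 1

theorem pvSkipLGe (s : List Char) (l r : Nat) : l ≤ bSkipL s l r := by
  unfold bSkipL
  split
  · exact le_trans (Nat.le_succ l) (pvSkipLGe s (l + 1) r)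
  · exact le_refl l
termination_by r + 1 - l
decreasing_by rename_i h; omega

theorem pvSkipRLe (s : List Char) (l r : Nat) : bSkipR s l r ≤ r := by
  induction r with
  | zero => simp [bSkipR]
  | succ r ih =>
    unfold bSkipR
    split
    · exact le_trans ih (Nat.le_succ r)
    · exact le_refl _

-- B's peeling `while` with two pointers
def bLoop (s : List Char) (m : PySem.Dict Nat Nat) (l r : Nat) : Nat × Nat :=
  if l < r ∧ s.getD l ' ' = '(' ∧ s.getD r ' ' = ')' ∧ r ≤ m.getD l r then
    bLoop s m (bSkipL s (l + 1) (r - 1)) (bSkipR s (bSkipL s (l + 1) (r - 1)) (r - 1))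
  else (l, r)
termination_by r - l
decreasing_by
  rename_i h
  have h1 := pvSkipLGe s (l + 1) (r - 1)
  have h2 := pvSkipRLe s (bSkipL s (l + 1) (r - 1)) (r - 1)
  omega

def strip_outer_expr_parens_py_alt (expr_str : String) : String :=
  let s := PySem.Chars.strip expr_str.toList
  let m := bBuild s 0 [] PySem.Dict.empty false false
  let p := bLoop s m 0 (s.length - 1)
  String.ofList (PySem.Chars.slice s (some (p.1 : Int)) (some ((p.2 : Int) + 1)))

-- ===== PRECONDITION & SPEC =====
def Spec_strip_outer_expr_parens_py (expr_str : String) (out : String) : Prop := out = strip_outer_expr_parens_py_alt expr_str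
instance (expr_str : String) (out : String) : Decidable (Spec_strip_outer_expr_parens_py expr_str out) := by unfold Spec_strip_outer_expr_parens_py; infer_instance

-- ===== CLAIM (what is proved, stated in full; the proofs are below) =====
def Claim_equal_strip_outer_expr_parens_py : Prop := ∀ (expr_str : String), Dom_strip_outer_expr_parens_py expr_str → Spec_strip_outer_expr_parens_py expr_str (strip_outer_expr_parens_py expr_str)

-- ===== LEMMAS AND PROOFS =====

-- `mc u d sq dq` : offset of the first char at which A's depth counter would hit 0
-- (quote-aware, starting depth d); the semantic bridge between A's scan and B's match dict.
def mc : List Char → Int → Bool → Bool → Option Nat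
  | [], _, _, _ => none
  | c :: rest, depth, sq, dq =>
    if c = '\'' ∧ dq = false then (mc rest depth (!sq) dq).map (· + 1)
    else if c = '"' ∧ sq = false then (mc rest depth sq (!dq)).map (· + 1)
    else if c = '(' ∧ sq = false ∧ dq = false then (mc rest (depth + 1) sq dq).map (· + 1)
    else if c = ')' ∧ sq = false ∧ dq = false then
      (if depth - 1 = 0 then some 0 else (mc rest (depth - 1) sq dq).map (· + 1))
    else (mc rest depth sq dq).map (· + 1)

theorem mc_lt {u : List Char} {d : Int} {sq dq : Bool} {k : Nat}
    (h : mc u d sq dq = some k) : k < u.length := by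
  induction u generalizing d sq dq k with
  | nil => simp [mc] at h
  | cons c rest ih =>
    simp only [mc] at h
    split_ifs at h with h1 h2 h3 h4 h5 <;>
      first
      | (simp only [Option.map_eq_some_iff] at h
         obtain ⟨k', hk', rfl⟩ := h
         have := ih hk'; simp; omega)
      | (simp at h; subst h; simp)

theorem mc_append_some {u : List Char} (v : List Char) {d : Int} {sq dq : Bool} {k : Nat}
    (h : mc u d sq dq = some k) : mc (u ++ v) d sq dq = some k := by
  induction u generalizing d sq dq k with
  | nil => simp [mc] at h
  | cons c rest ih =>
    simp only [mc, List.cons_append] at h ⊢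
    split_ifs at h ⊢ with h1 h2 h3 h4 h5 <;>
      first
      | (simp only [Option.map_eq_some_iff] at h ⊢
         obtain ⟨k', hk', rfl⟩ := h
         exact ⟨k', ih hk', rfl⟩)
      | exact h

theorem mc_append_lt {u v : List Char} {d : Int} {sq dq : Bool} {k : Nat}
    (h : mc (u ++ v) d sq dq = some k) (hk : k < u.length) : mc u d sq dq = some k := by
  induction u generalizing d sq dq k with
  | nil => simp at hk
  | cons c rest ih =>
    simp only [mc, List.cons_append] at h ⊢
    split_ifs at h ⊢ with h1 h2 h3 h4 h5 <;>
      first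
      | (simp only [Option.map_eq_some_iff] at h ⊢
         obtain ⟨k', hk', rfl⟩ := h
         exact ⟨k', ih hk' (by simp at hk; omega), rfl⟩)
      | exact h

-- A's wraps flag in terms of mc
-- A's wraps flag as a function of the scan outcome
def wrapsOf (len : Nat) (o : Option Nat) : Bool :=
  match o with
  | none => true
  | some k => decide (k = len - 1)

theorem shift_match {rest : List Char} {o : Option Nat} (c : Char)
    (h : ∀ k, o = some k → k < rest.length) :
    wrapsOf (c :: rest).length (Option.map (· + 1) o) = wrapsOf rest.length o := by
  cases o with
  | none => rfl
  | some k =>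
    have := h k rfl
    simp only [wrapsOf, Option.map_some, List.length_cons]
    rw [decide_eq_decide]; omega

theorem wraps_eq (u : List Char) (d : Int) (sq dq : Bool) :
    aWraps u d sq dq = wrapsOf u.length (mc u d sq dq) := by
  induction u generalizing d sq dq with
  | nil => simp [aWraps, mc, wrapsOf]
  | cons c rest ih =>
    by_cases h1 : c = '\'' ∧ dq = false
    · simp only [aWraps, mc, if_pos h1]
      rw [ih]; exact (shift_match c (fun k hk => mc_lt hk)).symm
    · by_cases h2 : c = '"' ∧ sq = false
      · simp only [aWraps, mc, if_neg h1, if_pos h2]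
        rw [ih]; exact (shift_match c (fun k hk => mc_lt hk)).symm
      · by_cases h3 : c = '(' ∧ sq = false ∧ dq = false
        · simp only [aWraps, mc, if_neg h1, if_neg h2, if_pos h3]
          rw [ih]; exact (shift_match c (fun k hk => mc_lt hk)).symm
        · by_cases h4 : c = ')' ∧ sq = false ∧ dq = false
          · simp only [aWraps, mc, if_neg h1, if_neg h2, if_neg h3, if_pos h4]
            by_cases hd0 : d - 1 = 0
            · rw [if_pos hd0]
              cases rest with
              | nil =>
                rw [if_neg (by simp : ¬(d - 1 = 0 ∧ ([] : List Char) ≠ []))]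
                simp [aWraps, wrapsOf]
              | cons x xs =>
                rw [if_pos ⟨hd0, by simp⟩]
                simp [wrapsOf]
            · rw [if_neg hd0, if_neg (by tauto : ¬(d - 1 = 0 ∧ rest ≠ []))]
              rw [ih]; exact (shift_match c (fun k hk => mc_lt hk)).symm
          · simp only [aWraps, mc, if_neg h1, if_neg h2, if_neg h3, if_neg h4]
            rw [ih]; exact (shift_match c (fun k hk => mc_lt hk)).symm


def BWF (i : Nat) (st : List Nat) (m : PySem.Dict Nat Nat) : Prop :=
  (st ++ m.keys).Nodup ∧ ∀ x ∈ st ++ m.keys, x < i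

theorem BWF_mono {i : Nat} {st : List Nat} {m : PySem.Dict Nat Nat}
    (h : BWF i st m) : BWF (i + 1) st m :=
  ⟨h.1, fun x hx => Nat.lt_succ_of_lt (h.2 x hx)⟩

theorem BWF_push {i : Nat} {st : List Nat} {m : PySem.Dict Nat Nat}
    (h : BWF i st m) : BWF (i + 1) (i :: st) m := by
  refine ⟨?_, ?_⟩
  · simp only [List.cons_append, List.nodup_cons]
    exact ⟨fun hx => Nat.lt_irrefl i (h.2 i hx), h.1⟩
  · intro x hx
    simp only [List.cons_append, List.mem_cons] at hx
    rcases hx with rfl | hx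
    · omega
    · exact Nat.lt_succ_of_lt (h.2 x hx)

theorem BWF_pop {i l : Nat} {st : List Nat} {m : PySem.Dict Nat Nat}
    (h : BWF i (l :: st) m) : BWF (i + 1) st (m.insert l i) := by
  have hlk : l ∉ m.keys := by
    have := h.1
    simp only [List.cons_append, List.nodup_cons] at this
    exact fun hmem => this.1 (List.mem_append_right st hmem)
  have hcont : m.contains l = false := by
    rw [← Bool.not_eq_true, PySem.Dict.contains_iff_mem_keys]
    exact hlk
  have hkeys : (m.insert l i).keys = m.keys ++ [l] :=
    PySem.Dict.keys_insert_of_not_contains _ _ hcont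
  refine ⟨?_, ?_⟩
  · rw [hkeys, ← List.append_assoc]
    have hperm : (l :: (st ++ m.keys)).Perm (st ++ m.keys ++ [l]) :=
      (List.perm_append_singleton l (st ++ m.keys)).symm
    exact hperm.nodup (by simpa using h.1)
  · intro x hx
    rw [hkeys, ← List.append_assoc] at hx
    simp only [List.mem_append, List.mem_singleton] at hx
    have hb := h.2
    simp only [List.cons_append, List.mem_cons, List.mem_append] at hb
    rcases hx with (hx | hx) | rfl
    · exact Nat.lt_succ_of_lt (hb x (Or.inr (Or.inl hx)))
    · exact Nat.lt_succ_of_lt (hb x (Or.inr (Or.inr hx)))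
    · exact Nat.lt_succ_of_lt (hb x (Or.inl rfl))

theorem map_shift (o : Option Nat) (i : Nat) :
    (Option.map (· + 1) o).map (fun k => i + k) = o.map (fun k => i + 1 + k) := by
  cases o with
  | none => rfl
  | some k => simp only [Option.map_some]; congr 1; omega

theorem bBuild_get (u : List Char) : ∀ (i : Nat) (st : List Nat) (m : PySem.Dict Nat Nat)
    (sq dq : Bool), BWF i st m →
    ((∀ idx, ∀ h : idx < st.length,
        (bBuild u i st m sq dq).get? st[idx] = (mc u ((idx : Int) + 1) sq dq).map (fun k => i + k))
     ∧ (∀ x, x < i → x ∉ st → (bBuild u i st m sq dq).get? x = m.get? x)) := by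
  induction u with
  | nil =>
    intro i st m sq dq hwf
    constructor
    · intro idx h
      have hmem : st[idx] ∈ st := List.getElem_mem h
      have hnk : st[idx] ∉ m.keys := by
        have hd := (List.nodup_append.mp hwf.1).2.2
        intro hk
        first
          | exact hd hmem hk
          | exact hd _ hmem hk
          | exact absurd rfl (hd _ hmem _ hk)
      simp only [bBuild, mc, Option.map_none]
      exact (PySem.Dict.get?_eq_none_iff_not_mem_keys _ _).mpr hnk
    · intro x _ _; rfl
  | cons c rest ih =>
    intro i st m sq dq hwf
    by_cases h1 : c = '\'' ∧ dq = false
    · have IH := ih (i + 1) st m (!sq) dq (BWF_mono hwf)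
      simp only [bBuild, mc, if_pos h1]
      refine ⟨fun idx h => ?_, fun x hx hxs => ?_⟩
      · rw [map_shift]; exact IH.1 idx h
      · exact IH.2 x (Nat.lt_succ_of_lt hx) hxs
    · by_cases h2 : c = '"' ∧ sq = false
      · have IH := ih (i + 1) st m sq (!dq) (BWF_mono hwf)
        simp only [bBuild, mc, if_neg h1, if_pos h2]
        refine ⟨fun idx h => ?_, fun x hx hxs => ?_⟩
        · rw [map_shift]; exact IH.1 idx h
        · exact IH.2 x (Nat.lt_succ_of_lt hx) hxs
      · by_cases h3 : c = '(' ∧ sq = false ∧ dq = false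
        · have IH := ih (i + 1) (i :: st) m sq dq (BWF_push hwf)
          simp only [bBuild, mc, if_neg h1, if_neg h2, if_pos h3]
          refine ⟨fun idx h => ?_, fun x hx hxs => ?_⟩
          · rw [map_shift]
            have h' : idx + 1 < (i :: st).length := by simp; omega
            have := IH.1 (idx + 1) h'
            rw [show (i :: st)[idx + 1] = st[idx] from rfl] at this
            rw [show ((idx + 1 : Nat) : Int) + 1 = ((idx : Int) + 1) + 1 from by push_cast; ring] at this
            exact this
          · have hxi : x ∉ i :: st := by
              simp only [List.mem_cons]
              rintro (rfl | hmem)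
              · omega
              · exact hxs hmem
            exact IH.2 x (Nat.lt_succ_of_lt hx) hxi
        · by_cases h4 : c = ')' ∧ sq = false ∧ dq = false
          · cases st with
            | nil =>
              have IH := ih (i + 1) [] m sq dq (BWF_mono hwf)
              simp only [bBuild, mc, if_neg h1, if_neg h2, if_neg h3, if_pos h4]
              refine ⟨fun idx h => ?_, fun x hx hxs => ?_⟩
              · simp at h
              · exact IH.2 x (Nat.lt_succ_of_lt hx) hxs
            | cons l st' =>
              have IH := ih (i + 1) st' (m.insert l i) sq dq (BWF_pop hwf)
              have hli : l < i := hwf.2 l (by simp)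
              have hlst' : l ∉ st' := by
                have := hwf.1
                simp only [List.cons_append, List.nodup_cons, List.mem_append] at this
                exact fun hm => this.1 (Or.inl hm)
              simp only [bBuild, mc, if_neg h1, if_neg h2, if_neg h3, if_pos h4]
              refine ⟨fun idx h => ?_, fun x hx hxs => ?_⟩
              · cases idx with
                | zero =>
                  rw [if_pos (by norm_num : ((0 : Nat) : Int) + 1 - 1 = 0)]
                  simp only [List.getElem_cons_zero, Option.map_some]
                  rw [IH.2 l (by omega) hlst']
                  rw [PySem.Dict.get?_insert_self]
                  simp
                | succ j =>
                  rw [if_neg (by push_cast; omega : ¬ ((j + 1 : Nat) : Int) + 1 - 1 = 0)]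
                  rw [map_shift]
                  have h' : j < st'.length := by simp at h; omega
                  have := IH.1 j h'
                  rw [show (((j : Nat) : Int) + 1) = ((j + 1 : Nat) : Int) + 1 - 1 from by push_cast; ring] at this
                  simpa using this
              · have hxl : x ≠ l := by
                  intro rfl'; subst rfl'; exact hxs (by simp)
                have hxst' : x ∉ st' := fun hm => hxs (by simp [hm])
                rw [IH.2 x (Nat.lt_succ_of_lt hx) hxst']
                exact PySem.Dict.get?_insert_of_ne _ _ hxl
          · have IH := ih (i + 1) st m sq dq (BWF_mono hwf)
            simp only [bBuild, mc, if_neg h1, if_neg h2, if_neg h3, if_neg h4]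
            refine ⟨fun idx h => ?_, fun x hx hxs => ?_⟩
            · rw [map_shift]; exact IH.1 idx h
            · exact IH.2 x (Nat.lt_succ_of_lt hx) hxs

theorem bBuild_prefix (pre : List Char) : ∀ (v : List Char) (i : Nat) (st : List Nat)
    (m : PySem.Dict Nat Nat), (∀ c ∈ pre, c ≠ '\'' ∧ c ≠ '"') → BWF i st m →
    ∃ st' m', BWF (i + pre.length) st' m' ∧
      bBuild (pre ++ v) i st m false false = bBuild v (i + pre.length) st' m' false false := by
  induction pre with
  | nil => intro v i st m _ hwf; exact ⟨st, m, by simpa using hwf, by simp⟩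
  | cons c pre' ih =>
    intro v i st m hq hwf
    have hc := hq c (by simp)
    have hq' : ∀ x ∈ pre', x ≠ '\'' ∧ x ≠ '"' := fun x hx => hq x (by simp [hx])
    rw [List.cons_append]
    simp only [bBuild, List.length_cons]
    rw [if_neg (show ¬(c = '\'' ∧ True) from by simp [hc.1]),
        if_neg (show ¬(c = '"' ∧ True) from by simp [hc.2]),
        show i + (pre'.length + 1) = i + 1 + pre'.length from by omega]
    by_cases h3 : c = '('
    · rw [if_pos (show c = '(' ∧ True ∧ True from by simp [h3])]
      obtain ⟨st', m', hwf', heq⟩ := ih v (i + 1) (i :: st) m hq' (BWF_push hwf)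
      exact ⟨st', m', hwf', heq⟩
    · rw [if_neg (show ¬(c = '(' ∧ True ∧ True) from by simp [h3])]
      by_cases h4 : c = ')'
      · rw [if_pos (show c = ')' ∧ True ∧ True from by simp [h4])]
        cases st with
        | nil =>
          obtain ⟨st', m', hwf', heq⟩ := ih v (i + 1) [] m hq' (BWF_mono hwf)
          exact ⟨st', m', hwf', heq⟩
        | cons l st0 =>
          obtain ⟨st', m', hwf', heq⟩ := ih v (i + 1) st0 (m.insert l i) hq' (BWF_pop hwf)
          exact ⟨st', m', hwf', heq⟩
      · rw [if_neg (show ¬(c = ')' ∧ True ∧ True) from by simp [h4])]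
        obtain ⟨st', m', hwf', heq⟩ := ih v (i + 1) st m hq' (BWF_mono hwf)
        exact ⟨st', m', hwf', heq⟩

theorem isspace_nonquote (c : Char) (h : PySem.Chars.isspace c = true) :
    c ≠ '\'' ∧ c ≠ '"' := by
  constructor <;> rintro rfl <;> revert h <;> decide

theorem startswith_single (a c : Char) (u : List Char) :
    PySem.Chars.startswith (a :: u) [c] = (c == a) := by
  simp [PySem.Chars.startswith, List.isPrefixOf]

theorem endswith_single (a c : Char) (u : List Char) :
    PySem.Chars.endswith (u ++ [a]) [c] = (c == a) := by
  simp [PySem.Chars.endswith, List.isSuffixOf, List.isPrefixOf]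

theorem skipL_stopped (s : List Char) (l r : Nat) (h : bSkipL s l r ≤ r) :
    PySem.Chars.isspace (s.getD (bSkipL s l r) ' ') = false := by
  by_cases hg : l ≤ r ∧ PySem.Chars.isspace (s.getD l ' ') = true
  · rw [bSkipL, if_pos hg] at h ⊢
    exact skipL_stopped s (l + 1) r h
  · rw [bSkipL, if_neg hg] at h ⊢
    by_cases hsp : PySem.Chars.isspace (s.getD l ' ') = true
    · exact absurd ⟨h, hsp⟩ hg
    · simpa using hsp
termination_by r + 1 - l
decreasing_by omega

theorem skipL_mid (s : List Char) (l r j : Nat) (h1 : l ≤ j) (h2 : j < bSkipL s l r) :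
    PySem.Chars.isspace (s.getD j ' ') = true := by
  by_cases hg : l ≤ r ∧ PySem.Chars.isspace (s.getD l ' ') = true
  · rw [bSkipL, if_pos hg] at h2
    rcases Nat.eq_or_lt_of_le h1 with rfl | hlt
    · exact hg.2
    · exact skipL_mid s (l + 1) r j hlt h2
  · rw [bSkipL, if_neg hg] at h2
    omega
termination_by r + 1 - l
decreasing_by omega

theorem skipL_le (s : List Char) (l r : Nat) (h : l ≤ r + 1) : bSkipL s l r ≤ r + 1 := by
  by_cases hg : l ≤ r ∧ PySem.Chars.isspace (s.getD l ' ') = true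
  · rw [bSkipL, if_pos hg]
    exact skipL_le s (l + 1) r (by omega)
  · rw [bSkipL, if_neg hg]
    exact h
termination_by r + 1 - l
decreasing_by omega

theorem skipL_drop (s : List Char) (l r : Nat) (hrn : r < s.length) :
    List.dropWhile PySem.Chars.isspace ((s.drop l).take (r + 1 - l))
      = (s.drop (bSkipL s l r)).take (r + 1 - bSkipL s l r) := by
  by_cases hg : l ≤ r ∧ PySem.Chars.isspace (s.getD l ' ') = true
  · have hln : l < s.length := by omega
    have hdec : (s.drop l).take (r + 1 - l) = s[l] :: ((s.drop (l + 1)).take (r + 1 - (l + 1))) := by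
      rw [List.drop_eq_getElem_cons hln, show r + 1 - l = (r + 1 - (l + 1)) + 1 from by omega,
        List.take_succ_cons]
    have hsp : PySem.Chars.isspace s[l] = true := by
      have := hg.2
      rwa [List.getD_eq_getElem s ' ' hln] at this
    rw [bSkipL, if_pos hg, hdec, List.dropWhile_cons_of_pos hsp]
    exact skipL_drop s (l + 1) r hrn
  · rw [bSkipL, if_neg hg]
    by_cases hlr : l ≤ r
    · have hln : l < s.length := by omega
      have hsp : PySem.Chars.isspace s[l] = false := by
        by_cases hsp' : PySem.Chars.isspace (s.getD l ' ') = true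
        · exact absurd ⟨hlr, hsp'⟩ hg
        · rw [List.getD_eq_getElem s ' ' hln] at hsp'
          simpa using hsp'
      rw [List.drop_eq_getElem_cons hln, show r + 1 - l = (r - l) + 1 from by omega,
        List.take_succ_cons, List.dropWhile_cons_of_neg (by simp [hsp]),
        ← List.take_succ_cons, ← List.drop_eq_getElem_cons hln,
        show (r - l) + 1 = r + 1 - l from by omega]
    · rw [show r + 1 - l = 0 from by omega]
      simp
termination_by r + 1 - l
decreasing_by omega

theorem rstrip_append_space (u : List Char) (c : Char) (hc : PySem.Chars.isspace c = true) :
    PySem.Chars.rstrip (u ++ [c]) = PySem.Chars.rstrip u := by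
  simp [PySem.Chars.rstrip, List.dropWhile_cons_of_pos hc]

theorem rstrip_append_nonspace (u : List Char) (c : Char)
    (hc : PySem.Chars.isspace c = false) : PySem.Chars.rstrip (u ++ [c]) = u ++ [c] := by
  have h : ¬ PySem.Chars.isspace c = true := by simp [hc]
  simp [PySem.Chars.rstrip, List.dropWhile_cons_of_neg h]

theorem skipR_take (s : List Char) (l r : Nat) (hrn : r < s.length)
    (hl : l ≤ r → PySem.Chars.isspace (s.getD l ' ') = false) :
    PySem.Chars.rstrip ((s.drop l).take (r + 1 - l))
      = (s.drop l).take (bSkipR s l r + 1 - l) := by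
  induction r with
  | zero =>
    rw [show bSkipR s l 0 = 0 from rfl]
    rcases Nat.eq_zero_or_pos l with rfl | hl1
    · cases s with
      | nil => simp at hrn
      | cons a s' =>
        have hsp : PySem.Chars.isspace a = false := by simpa using hl (le_refl 0)
        simpa using rstrip_append_nonspace [] a hsp
    · rw [show 0 + 1 - l = 0 from by omega]
      simp [PySem.Chars.rstrip]
  | succ r ih =>
    have hrn' : r < s.length := by omega
    by_cases hg : l ≤ r + 1 ∧ PySem.Chars.isspace (s.getD (r + 1) ' ') = true
    · have hdec : (s.drop l).take (r + 1 + 1 - l)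
          = (s.drop l).take (r + 1 - l) ++ [s[r + 1]] := by
        rw [show r + 1 + 1 - l = (r + 1 - l) + 1 from by omega, List.take_succ]
        congr 1
        rw [List.getElem?_drop, show l + (r + 1 - l) = r + 1 from by omega]
        simp [List.getElem?_eq_getElem hrn]
      have hsp : PySem.Chars.isspace s[r + 1] = true := by
        have := hg.2
        rwa [List.getD_eq_getElem s ' ' hrn] at this
      rw [show bSkipR s l (r + 1) = bSkipR s l r from by rw [bSkipR, if_pos hg]]
      rw [hdec, rstrip_append_space _ _ hsp]
      exact ih hrn' (fun h => hl (by omega))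
    · rw [show bSkipR s l (r + 1) = r + 1 from by rw [bSkipR, if_neg hg]]
      by_cases hlr : l ≤ r + 1
      · have hsp : PySem.Chars.isspace s[r + 1] = false := by
          by_cases hsp' : PySem.Chars.isspace (s.getD (r + 1) ' ') = true
          · exact absurd ⟨hlr, hsp'⟩ hg
          · rw [List.getD_eq_getElem s ' ' hrn] at hsp'
            simpa using hsp'
        have hdec : (s.drop l).take (r + 1 + 1 - l)
            = (s.drop l).take (r + 1 - l) ++ [s[r + 1]] := by
          rw [show r + 1 + 1 - l = (r + 1 - l) + 1 from by omega, List.take_succ]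
          congr 1
          rw [List.getElem?_drop, show l + (r + 1 - l) = r + 1 from by omega]
          simp [List.getElem?_eq_getElem hrn]
        rw [hdec, rstrip_append_nonspace _ _ hsp, ← hdec]
      · rw [show r + 1 + 1 - l = 0 from by omega]
        simp [PySem.Chars.rstrip]

theorem cond_iff (s : List Char) (l r : Nat)
    (hq : ∀ c ∈ s.take l, c ≠ '\'' ∧ c ≠ '"') (hlr : l < r) (hrn : r < s.length)
    (hl : s[l]'(by omega) = '(') (hr : s[r]'hrn = ')') :
    (aWraps ((s.drop l).take (r + 1 - l)) 0 false false = true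
      ↔ r ≤ (bBuild s 0 [] PySem.Dict.empty false false).getD l r) := by
  have hln : l < s.length := by omega
  have hwf0 : BWF 0 [] PySem.Dict.empty := by
    constructor
    · simp [PySem.Dict.keys_empty]
    · intro x hx; simp [PySem.Dict.keys_empty] at hx
  obtain ⟨st0, m0, hwf, heq⟩ :=
    bBuild_prefix (s.take l) ('(' :: s.drop (l + 1)) 0 [] PySem.Dict.empty hq hwf0
  have hlen : (s.take l).length = l := by rw [List.length_take]; omega
  rw [hlen, Nat.zero_add] at hwf heq
  have hsplit : s.take l ++ '(' :: s.drop (l + 1) = s := by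
    conv_rhs => rw [← List.take_append_drop l s]
    congr 1
    rw [List.drop_eq_getElem_cons hln]
    simp [hl]
  rw [hsplit] at heq
  have hstep : bBuild ('(' :: s.drop (l + 1)) l st0 m0 false false
      = bBuild (s.drop (l + 1)) (l + 1) (l :: st0) m0 false false := by
    simp only [bBuild]
    rw [if_neg (show ¬('(' = '\'' ∧ True) from by simp),
        if_neg (show ¬('(' = '"' ∧ True) from by simp),
        if_pos (show (True ∧ True ∧ True) from by simp)]
  have hget : (bBuild s 0 [] PySem.Dict.empty false false).get? l
      = (mc (s.drop (l + 1)) 1 false false).map (fun k => l + 1 + k) := by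
    rw [heq, hstep]
    have h0 := (bBuild_get (s.drop (l + 1)) (l + 1) (l :: st0) m0 false false
      (BWF_push hwf)).1 0 (by simp)
    simpa using h0
  have htA : (s.drop l).take (r + 1 - l) = '(' :: (s.drop (l + 1)).take (r - l) := by
    rw [List.drop_eq_getElem_cons hln, show r + 1 - l = (r - l) + 1 from by omega,
      List.take_succ_cons]
    simp [hl]
  have hmidlen : ((s.drop (l + 1)).take (r - l)).length = r - l := by
    rw [List.length_take, List.length_drop]; omega
  have hvdec : (s.drop (l + 1)).take (r - l) ++ (s.drop (l + 1)).drop (r - l) = s.drop (l + 1) :=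
    List.take_append_drop _ _
  rw [htA]
  have hstepA : aWraps ('(' :: (s.drop (l + 1)).take (r - l)) 0 false false
      = aWraps ((s.drop (l + 1)).take (r - l)) 1 false false := by
    simp only [aWraps]
    rw [if_neg (show ¬('(' = '\'' ∧ True) from by simp),
        if_neg (show ¬('(' = '"' ∧ True) from by simp),
        if_pos (show (True ∧ True ∧ True) from by simp),
        show (0 : Int) + 1 = 1 from by norm_num]
  rw [show aWraps ('(' :: (s.drop (l + 1)).take (r - l)) 0 false false = true
        ↔ aWraps ((s.drop (l + 1)).take (r - l)) 1 false false = true from by rw [hstepA]]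
  rw [wraps_eq]
  cases hmc : mc (s.drop (l + 1)) 1 false false with
  | none =>
    have hmcmid : mc ((s.drop (l + 1)).take (r - l)) 1 false false = none := by
      cases hmid : mc ((s.drop (l + 1)).take (r - l)) 1 false false with
      | none => rfl
      | some k =>
        have h2 := mc_append_some ((s.drop (l + 1)).drop (r - l)) hmid
        rw [hvdec, hmc] at h2
        cases h2
    have hD : (bBuild s 0 [] PySem.Dict.empty false false).getD l r = r := by
      rw [PySem.Dict.getD_eq_get?_getD, hget, hmc]; rfl
    rw [hmcmid, hD]
    simp [wrapsOf]
  | some k =>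
    have hkv := mc_lt hmc
    have hD : (bBuild s 0 [] PySem.Dict.empty false false).getD l r = l + 1 + k := by
      rw [PySem.Dict.getD_eq_get?_getD, hget, hmc]; rfl
    rw [hD]
    by_cases hklt : k < r - l
    · have hmid : mc ((s.drop (l + 1)).take (r - l)) 1 false false = some k := by
        apply mc_append_lt (v := (s.drop (l + 1)).drop (r - l))
        · rw [hvdec]; exact hmc
        · rw [hmidlen]; exact hklt
      rw [hmid]
      simp only [wrapsOf, hmidlen, decide_eq_true_eq]
      constructor
      · intro hk; omega
      · intro hk; omega
    · have hmid : mc ((s.drop (l + 1)).take (r - l)) 1 false false = none := by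
        cases hmid' : mc ((s.drop (l + 1)).take (r - l)) 1 false false with
        | none => rfl
        | some k' =>
          have h2 := mc_append_some ((s.drop (l + 1)).drop (r - l)) hmid'
          rw [hvdec, hmc] at h2
          have hk'lt := mc_lt hmid'
          rw [hmidlen] at hk'lt
          have : k = k' := Option.some_inj.mp h2
          omega
      rw [hmid]
      simp only [wrapsOf]
      constructor
      · intro _; omega
      · intro _; trivial


theorem slice_one_negone (t : List Char) (h : 2 ≤ t.length) :
    PySem.List.slice t (some 1) (some (-1)) = (t.drop 1).take (t.length - 2) := by
  simp only [PySem.List.slice, PySem.List.clampIdx]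
  rw [if_neg (by norm_num : ¬ ((1 : Int) < 0)), if_pos (by norm_num : ((-1 : Int) < 0)),
    if_neg (by omega : ¬ ((t.length : Int) + (-1) < 0))]
  have h1 : ((t.length : Int) + (-1)).toNat = t.length - 1 := by omega
  have h2 : min (1 : Int).toNat t.length = 1 := by
    simp only [Int.toNat_one]; omega
  rw [h1, h2, show t.length - 1 - 1 = t.length - 2 from by omega]

theorem main_loop (s : List Char) (g : PySem.Dict Nat Nat)
    (hg : g = bBuild s 0 [] PySem.Dict.empty false false) :
    ∀ (N l r : Nat), r + 1 - l ≤ N →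
    (∀ c ∈ s.take l, c ≠ '\'' ∧ c ≠ '"') → (l < r → r < s.length) →
    aLoop ((s.drop l).take (r + 1 - l))
      = (s.drop (bLoop s g l r).1).take ((bLoop s g l r).2 + 1 - (bLoop s g l r).1) := by
  subst hg
  intro N
  induction N with
  | zero =>
    intro l r hN hq hinv
    have ht : (s.drop l).take (r + 1 - l) = [] := by
      rw [show r + 1 - l = 0 from by omega, List.take_zero]
    rw [bLoop, if_neg (fun h => absurd h.1 (by omega))]
    rw [aLoop, ht, if_neg (by simp [PySem.Chars.startswith, List.isPrefixOf])]
  | succ N ih =>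
    intro l r hN hq hinv
    by_cases hlr : l < r
    · have hrn := hinv hlr
      have hln : l < s.length := by omega
      have htA : (s.drop l).take (r + 1 - l) = s[l] :: ((s.drop (l + 1)).take (r - l)) := by
        rw [List.drop_eq_getElem_cons hln, show r + 1 - l = (r - l) + 1 from by omega,
          List.take_succ_cons]
      have htB : (s.drop l).take (r + 1 - l) = (s.drop l).take (r - l) ++ [s[r]] := by
        rw [show r + 1 - l = (r - l) + 1 from by omega, List.take_succ]
        congr 1
        rw [List.getElem?_drop, show l + (r - l) = r from by omega]
        simp [List.getElem?_eq_getElem hrn]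
      have hgl : s.getD l ' ' = s[l] := List.getD_eq_getElem s ' ' hln
      have hgr : s.getD r ' ' = s[r] := List.getD_eq_getElem s ' ' hrn
      by_cases hlp : s[l] = '('
      · by_cases hrp : s[r] = ')'
        · have hsw : PySem.Chars.startswith ((s.drop l).take (r + 1 - l)) ['('] = true := by
            rw [htA, startswith_single]
            simp [hlp]
          have hew : PySem.Chars.endswith ((s.drop l).take (r + 1 - l)) [')'] = true := by
            rw [htB, endswith_single]
            simp [hrp]
          have hciff := cond_iff s l r hq hlr hrn hlp hrp
          by_cases hw : aWraps ((s.drop l).take (r + 1 - l)) 0 false false = true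
          · rw [aLoop, if_pos ⟨hsw, hew⟩, if_pos hw]
            rw [bLoop, if_pos ⟨hlr, by rw [hgl]; exact hlp, by rw [hgr]; exact hrp, hciff.mp hw⟩]
            have hb1 : l + 1 ≤ bSkipL s (l + 1) (r - 1) := pvSkipLGe s (l + 1) (r - 1)
            have hb1' : bSkipL s (l + 1) (r - 1) ≤ r := by
              have := skipL_le s (l + 1) (r - 1) (by omega)
              omega
            have hb2 : bSkipR s (bSkipL s (l + 1) (r - 1)) (r - 1) ≤ r - 1 :=
              pvSkipRLe s (bSkipL s (l + 1) (r - 1)) (r - 1)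
            -- rewrite A's next argument into pointer form
            have hlent : ((s.drop l).take (r + 1 - l)).length = r + 1 - l := by
              rw [List.length_take, List.length_drop]; omega
            have harg : PySem.Chars.strip
                (PySem.Chars.slice ((s.drop l).take (r + 1 - l)) (some 1) (some (-1)))
                = (s.drop (bSkipL s (l + 1) (r - 1))).take
                    (bSkipR s (bSkipL s (l + 1) (r - 1)) (r - 1) + 1 - bSkipL s (l + 1) (r - 1)) := by
              rw [PySem.Chars.slice_eq_listSlice, slice_one_negone _ (by omega), hlent]
              rw [htA, List.drop_one, List.tail_cons, List.take_take,
                show min (r + 1 - l - 2) (r - l) = (r - 1) + 1 - (l + 1) from by omega]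
              simp only [PySem.Chars.strip, PySem.Chars.lstrip]
              rw [skipL_drop s (l + 1) (r - 1) (by omega)]
              rw [skipR_take s (bSkipL s (l + 1) (r - 1)) (r - 1) (by omega)
                (fun h => skipL_stopped s (l + 1) (r - 1) h)]
            rw [harg]
            -- invariants for the next state
            have hq' : ∀ c ∈ s.take (bSkipL s (l + 1) (r - 1)), c ≠ '\'' ∧ c ≠ '"' := by
              intro c hc
              obtain ⟨j, hj, hcj⟩ := List.mem_iff_getElem.mp hc
              have hjl : j < bSkipL s (l + 1) (r - 1) := by
                have := hj
                rw [List.length_take] at this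
                omega
              have hjn : j < s.length := by omega
              have hcs : c = s[j] := by
                rw [← hcj, List.getElem_take]
              rcases lt_trichotomy j l with hjlt | hjeq | hjgt
              · apply hq
                have hjlen : j < (s.take l).length := by
                  rw [List.length_take]; omega
                have hmem := List.getElem_mem hjlen
                rw [List.getElem_take] at hmem
                rwa [hcs]
              · subst hjeq
                rw [hcs, hlp]
                constructor <;> decide
              · have hsp := skipL_mid s (l + 1) (r - 1) j (by omega) hjl
                rw [List.getD_eq_getElem s ' ' hjn] at hsp
                rw [hcs]
                exact isspace_nonquote _ hsp
            exact ih (bSkipL s (l + 1) (r - 1)) (bSkipR s (bSkipL s (l + 1) (r - 1)) (r - 1))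
              (by omega) hq' (fun _ => by omega)
          · rw [bLoop, if_neg (fun hcon => hw (hciff.mpr hcon.2.2.2))]
            rw [aLoop, if_pos ⟨hsw, hew⟩, if_neg hw]
        · rw [bLoop, if_neg (fun hcon => hrp (by rw [← hgr]; exact hcon.2.2.1))]
          rw [aLoop, if_neg (fun hcon => ?_)]
          have h2 := hcon.2
          rw [htB, endswith_single] at h2
          exact hrp (beq_iff_eq.mp h2).symm
      · rw [bLoop, if_neg (fun hcon => hlp (by rw [← hgl]; exact hcon.2.1))]
        rw [aLoop, if_neg (fun hcon => ?_)]
        have h1 := hcon.1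
        rw [htA, startswith_single] at h1
        exact hlp (beq_iff_eq.mp h1).symm
    · rw [bLoop, if_neg (fun h => hlr h.1)]
      have hlen1 : ((s.drop l).take (r + 1 - l)).length ≤ 1 := by
        rw [List.length_take]
        omega
      rw [aLoop, if_neg (fun hcon => ?_)]
      rcases hT : (s.drop l).take (r + 1 - l) with _ | ⟨a, _ | ⟨b, u⟩⟩
      · rw [hT] at hcon
        simp [PySem.Chars.startswith, List.isPrefixOf] at hcon
      · rw [hT] at hcon
        have h1 := hcon.1
        have h2 := hcon.2
        rw [show (a :: ([] : List Char)) = [] ++ [a] from rfl, endswith_single] at h2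
        rw [startswith_single] at h1
        simp at h1 h2
        rw [← h1] at h2
        exact absurd h2 (by decide)
      · rw [hT] at hlen1
        simp at hlen1

-- ===== VERDICT (by name: the statement is the Claim_ definition above) =====
theorem strip_outer_expr_parens_py_spec : Claim_equal_strip_outer_expr_parens_py := by
  intro expr_str _
  unfold Spec_strip_outer_expr_parens_py
  unfold strip_outer_expr_parens_py strip_outer_expr_parens_py_alt
  dsimp only
  set s := PySem.Chars.strip expr_str.toList with hs
  set g := bBuild s 0 [] PySem.Dict.empty false false with hgdef
  set p := bLoop s g 0 (s.length - 1) with hp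
  have hmain := main_loop s g hgdef (s.length + 1) 0 (s.length - 1) (by omega)
    (by simp) (fun h => by omega)
  have harg : (s.drop 0).take (s.length - 1 + 1 - 0) = s := by
    rw [List.drop_zero]
    exact List.take_of_length_le (by omega)
  rw [harg, ← hp] at hmain
  rw [hmain]
  congr 1
  rw [PySem.Chars.slice_eq_listSlice,
    show ((p.2 : Int) + 1) = (((p.2 + 1 : Nat)) : Int) from by push_cast; ring,
    PySem.List.slice_natCast]
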